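-- pv_equiv track=rewrite | github.com/a-brandon/practice | edabit/substring_consonant_vowel_groups.py | get_vowel_substrings
-- ===== SOURCE A (Python) =====
-- def get_vowel_substrings(txt):
--     subs = []
--     vowels = ('a', 'e', 'i', 'o', 'u')
--
--     i = 0
--     while i < len(txt):
--         for j in range(len(txt)):
--             s = txt[0:j + 1]
--             if s not in subs and s[0] in vowels and s[-1] in vowels:
--                 subs.append(s)
--         txt = txt[i + 1:]
--
--     return sorted(subs)
-- ===== SOURCE B (Python) =====
-- def get_vowel_substrings(txt):
--     vowels = ('a', 'e', 'i', 'o', 'u')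
--     vpos = [k for k in range(len(txt)) if txt[k] in vowels]
--     seen = set()
--     for p in vpos:
--         for q in vpos:
--             if p <= q:
--                 seen.add(txt[p:q + 1])
--     return sorted(seen)
-- ===== Notes on version B (the rewrite author's own statement) =====
-- stated objective: faster
-- what changed: B indexes the vowel positions in one scan and enumerates only vowel-bounded spans (pairs of vowel positions) into a hash set, instead of A's repeated suffix-rebuilding pass that scans every prefix of every suffix and dedups by a linear list search.
import Mathlib
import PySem

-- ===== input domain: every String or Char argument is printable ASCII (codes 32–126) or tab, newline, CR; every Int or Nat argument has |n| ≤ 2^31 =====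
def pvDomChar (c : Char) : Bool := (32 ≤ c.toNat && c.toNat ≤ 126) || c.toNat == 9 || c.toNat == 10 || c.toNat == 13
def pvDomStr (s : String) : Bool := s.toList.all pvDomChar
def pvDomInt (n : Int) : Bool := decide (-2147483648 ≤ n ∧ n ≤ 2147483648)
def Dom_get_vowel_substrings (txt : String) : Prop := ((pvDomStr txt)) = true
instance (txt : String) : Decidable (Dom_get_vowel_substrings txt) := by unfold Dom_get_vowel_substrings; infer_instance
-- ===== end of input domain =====

-- B builds a vowel-position index and enumerates only vowel-bounded spans into a set, instead of
-- A's pass over every prefix of every suffix with a linear dedup scan; objective: faster (constant-factor/asymptotic in v≪n).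


-- ===== PORT A =====
def pvVowelsA : List Char := ['a', 'e', 'i', 'o', 'u']

-- the inner 'for j in range(len(txt))' pass; txt[0:j+1] is cs.take (j+1) (exact: bounds 0 and j+1 are
-- nonnegative and j+1 ≤ len); s[0]/s[-1] via headD/getLastD (the default is unreachable: j < len makes s nonempty)
def pvInnerA (cs : List Char) (subs : List String) : List String :=
  (List.range cs.length).foldl (fun subs j =>
    let s := cs.take (j + 1)
    if String.ofList s ∉ subs ∧ s.headD ' ' ∈ pvVowelsA ∧ s.getLastD ' ' ∈ pvVowelsA
    then subs ++ [String.ofList s] else subs) subs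

-- the 'while i < len(txt)' loop: i stays 0, so each round runs the inner pass and then txt = txt[1:]
def pvLoopA : List Char → List String → List String
  | [], subs => subs
  | c :: rest, subs => pvLoopA rest (pvInnerA (c :: rest) subs)

def get_vowel_substrings (txt : String) : List String :=
  PySem.List.sorted (pvLoopA txt.toList []) (fun x => x)

-- ===== PORT B =====  (shares the vowel constant with A)
-- inner 'for q in vpos' loop of Source B; txt[p:q+1] is (cs.drop p).take (q - p + 1) (exact: 0 ≤ p ≤ q+1 ≤ len)
def pvInnerB (cs : List Char) (vpos : List Nat) (p : Nat) (s : PySem.Set String) : PySem.Set String :=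
  vpos.foldl (fun s q =>
    if p ≤ q then PySem.Set.add s (String.ofList ((cs.drop p).take (q - p + 1))) else s) s

def get_vowel_substrings_alt (txt : String) : List String :=
  let cs := txt.toList
  let vpos := (List.range cs.length).filter (fun k => cs.getD k ' ' ∈ pvVowelsA)
  let seen := vpos.foldl (fun s p => pvInnerB cs vpos p s) (PySem.Set.empty : PySem.Set String)
  PySem.List.sorted seen (fun x => x)

-- ===== PRECONDITION & SPEC =====
def Spec_get_vowel_substrings (txt : String) (out : List String) : Prop := out = get_vowel_substrings_alt txt
instance (txt : String) (out : List String) : Decidable (Spec_get_vowel_substrings txt out) := by unfold Spec_get_vowel_substrings; infer_instance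

-- ===== CLAIM (what is proved, stated in full; the proofs are below) =====
def Claim_equal_get_vowel_substrings : Prop := ∀ (txt : String), Dom_get_vowel_substrings txt → Spec_get_vowel_substrings txt (get_vowel_substrings txt)

-- ===== LEMMAS AND PROOFS =====

-- the common characterisation: x is a substring of cs bounded by vowels at both ends
def pvGood (cs : List Char) (x : String) : Prop :=
  ∃ p q : Nat, p ≤ q ∧ q < cs.length ∧ cs.getD p ' ' ∈ pvVowelsA ∧ cs.getD q ' ' ∈ pvVowelsA ∧
    x = String.ofList ((cs.drop p).take (q - p + 1))

theorem pvHeadD_take (cs : List Char) (j : Nat) : (cs.take (j + 1)).headD ' ' = cs.headD ' ' := by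
  cases cs <;> simp

theorem pvGetLastD_take (cs : List Char) (j : Nat) (h : j < cs.length) :
    (cs.take (j + 1)).getLastD ' ' = cs.getD j ' ' := by
  induction cs generalizing j with
  | nil => simp at h
  | cons c rest ih =>
    cases j with
    | zero => simp
    | succ j =>
      simp only [List.take_succ_cons, List.getD_cons_succ]
      rw [← ih j (by simpa using h)]
      cases hrest : rest.take (j + 1) with
      | nil =>
        have hlen : min (j + 1) rest.length = 0 := by
          simpa using congrArg List.length hrest
        have h' : j + 1 < rest.length + 1 := by simpa using h
        omega
      | cons y ys => simp

theorem pvMem_foldA (cs : List Char) (l : List Nat) (subs : List String) (x : String) :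
    x ∈ l.foldl (fun subs j =>
      let s := cs.take (j + 1)
      if String.ofList s ∉ subs ∧ s.headD ' ' ∈ pvVowelsA ∧ s.getLastD ' ' ∈ pvVowelsA
      then subs ++ [String.ofList s] else subs) subs ↔
    x ∈ subs ∨ ∃ j ∈ l, ((cs.take (j + 1)).headD ' ' ∈ pvVowelsA ∧
      (cs.take (j + 1)).getLastD ' ' ∈ pvVowelsA) ∧ x = String.ofList (cs.take (j + 1)) := by
  induction l generalizing subs with
  | nil => simp
  | cons j t ih =>
    simp only [List.foldl_cons, ih, List.mem_cons]
    constructor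
    · rintro (hx | ⟨j', hj', hc, rfl⟩)
      · split_ifs at hx with h
        · rcases List.mem_append.1 hx with hx | hx
          · exact Or.inl hx
          · simp at hx; exact Or.inr ⟨j, Or.inl rfl, ⟨h.2.1, h.2.2⟩, hx⟩
        · exact Or.inl hx
      · exact Or.inr ⟨j', Or.inr hj', hc, rfl⟩
    · rintro (hx | ⟨j', (hj' | hj'), hc, rfl⟩)
      · left; split_ifs with h
        · exact List.mem_append.2 (Or.inl hx)
        · exact hx
      · subst hj'
        by_cases hin : String.ofList (cs.take (j' + 1)) ∈ subs
        · left; split_ifs with h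
          · exact List.mem_append.2 (Or.inl hin)
          · exact hin
        · left; rw [if_pos ⟨hin, hc.1, hc.2⟩]; simp
      · exact Or.inr ⟨j', hj', hc, rfl⟩

theorem pvNodup_foldA (cs : List Char) (l : List Nat) (subs : List String) (h : subs.Nodup) :
    (l.foldl (fun subs j =>
      let s := cs.take (j + 1)
      if String.ofList s ∉ subs ∧ s.headD ' ' ∈ pvVowelsA ∧ s.getLastD ' ' ∈ pvVowelsA
      then subs ++ [String.ofList s] else subs) subs).Nodup := by
  induction l generalizing subs with
  | nil => exact h
  | cons j t ih =>
    refine ih _ ?_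
    dsimp only
    split_ifs with hc
    · refine List.Nodup.append h (List.nodup_singleton _) ?_
      intro a ha hb
      simp only [List.mem_singleton] at hb
      subst hb
      exact hc.1 ha
    · exact h

theorem pvMem_innerA (cs : List Char) (subs : List String) (x : String) :
    x ∈ pvInnerA cs subs ↔ x ∈ subs ∨ ∃ j : Nat, j < cs.length ∧
      (cs.headD ' ' ∈ pvVowelsA ∧ cs.getD j ' ' ∈ pvVowelsA) ∧ x = String.ofList (cs.take (j + 1)) := by
  rw [pvInnerA, pvMem_foldA]
  constructor
  · rintro (hx | ⟨j, hj, hc, rfl⟩)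
    · exact Or.inl hx
    · rw [List.mem_range] at hj
      rw [pvHeadD_take, pvGetLastD_take cs j hj] at hc
      exact Or.inr ⟨j, hj, hc, rfl⟩
  · rintro (hx | ⟨j, hj, hc, rfl⟩)
    · exact Or.inl hx
    · rw [← pvHeadD_take cs j, ← pvGetLastD_take cs j hj] at hc
      exact Or.inr ⟨j, List.mem_range.2 hj, hc, rfl⟩

theorem pvMem_loopA (cs : List Char) (subs : List String) (x : String) :
    x ∈ pvLoopA cs subs ↔ x ∈ subs ∨ pvGood cs x := by
  induction cs generalizing subs with
  | nil =>
    simp only [pvLoopA, pvGood]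
    constructor
    · exact fun h => Or.inl h
    · rintro (h | ⟨p, q, _, hq, _⟩)
      · exact h
      · simp at hq
  | cons c rest ih =>
    rw [pvLoopA, ih, pvMem_innerA]
    constructor
    · rintro ((hx | ⟨j, hj, hc, rfl⟩) | hg)
      · exact Or.inl hx
      · refine Or.inr ⟨0, j, Nat.zero_le j, hj, ?_, ?_, ?_⟩
        · simpa using hc.1
        · exact hc.2
        · simp
      · rcases hg with ⟨p, q, hpq, hq, hp, hqv, rfl⟩
        refine Or.inr ⟨p + 1, q + 1, by omega, by simpa using hq, by simpa using hp, by simpa using hqv, ?_⟩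
        simp [Nat.succ_sub_succ]
    · rintro (hx | ⟨p, q, hpq, hq, hp, hqv, rfl⟩)
      · exact Or.inl (Or.inl hx)
      · cases p with
        | zero =>
          refine Or.inl (Or.inr ⟨q, hq, ⟨?_, hqv⟩, ?_⟩)
          · simpa using hp
          · simp
        | succ p =>
          cases q with
          | zero => omega
          | succ q =>
            refine Or.inr ⟨p, q, by omega, by simpa using hq, by simpa using hp, by simpa using hqv, ?_⟩
            simp [Nat.succ_sub_succ]

theorem pvNodup_innerA (cs : List Char) (subs : List String) (h : subs.Nodup) :
    (pvInnerA cs subs).Nodup := pvNodup_foldA cs _ subs h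

theorem pvNodup_loopA (cs : List Char) (subs : List String) (h : subs.Nodup) :
    (pvLoopA cs subs).Nodup := by
  induction cs generalizing subs with
  | nil => exact h
  | cons c rest ih => exact ih _ (pvNodup_innerA _ _ h)

theorem pvMem_innerB (cs : List Char) (l : List Nat) (p : Nat) (s : PySem.Set String) (x : String) :
    x ∈ pvInnerB cs l p s ↔ x ∈ s ∨ ∃ q ∈ l, p ≤ q ∧ x = String.ofList ((cs.drop p).take (q - p + 1)) := by
  induction l generalizing s with
  | nil => simp [pvInnerB]
  | cons q t ih =>
    rw [pvInnerB, List.foldl_cons, ← pvInnerB, ih]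
    by_cases hpq : p ≤ q
    · rw [if_pos hpq, PySem.Set.mem_add]
      constructor
      · rintro ((hx | rfl) | ⟨q', hq', hle, rfl⟩)
        · exact Or.inl hx
        · exact Or.inr ⟨q, List.mem_cons_self, hpq, rfl⟩
        · exact Or.inr ⟨q', List.mem_cons_of_mem _ hq', hle, rfl⟩
      · rintro (hx | ⟨q', hq', hle, rfl⟩)
        · exact Or.inl (Or.inl hx)
        · rcases List.mem_cons.1 hq' with rfl | hq'
          · exact Or.inl (Or.inr rfl)
          · exact Or.inr ⟨q', hq', hle, rfl⟩
    · rw [if_neg hpq]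
      constructor
      · rintro (hx | ⟨q', hq', hle, rfl⟩)
        · exact Or.inl hx
        · exact Or.inr ⟨q', List.mem_cons_of_mem _ hq', hle, rfl⟩
      · rintro (hx | ⟨q', hq', hle, rfl⟩)
        · exact Or.inl hx
        · rcases List.mem_cons.1 hq' with rfl | hq'
          · omega
          · exact Or.inr ⟨q', hq', hle, rfl⟩

theorem pvMem_foldB (cs : List Char) (vpos l : List Nat) (s : PySem.Set String) (x : String) :
    x ∈ l.foldl (fun s p => pvInnerB cs vpos p s) s ↔
    x ∈ s ∨ ∃ p ∈ l, ∃ q ∈ vpos, p ≤ q ∧ x = String.ofList ((cs.drop p).take (q - p + 1)) := by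
  induction l generalizing s with
  | nil => simp
  | cons p t ih =>
    rw [List.foldl_cons, ih, pvMem_innerB]
    constructor
    · rintro ((hx | ⟨q, hq, hle, rfl⟩) | ⟨p', hp', hrest⟩)
      · exact Or.inl hx
      · exact Or.inr ⟨p, List.mem_cons_self, q, hq, hle, rfl⟩
      · exact Or.inr ⟨p', List.mem_cons_of_mem _ hp', hrest⟩
    · rintro (hx | ⟨p', hp', hrest⟩)
      · exact Or.inl (Or.inl hx)
      · rcases List.mem_cons.1 hp' with rfl | hp'
        · exact Or.inl (Or.inr hrest)
        · exact Or.inr ⟨p', hp', hrest⟩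

theorem pvNodup_innerB (cs : List Char) (l : List Nat) (p : Nat) (s : PySem.Set String)
    (h : List.Nodup s) : List.Nodup (pvInnerB cs l p s) := by
  induction l generalizing s with
  | nil => exact h
  | cons q t ih =>
    rw [pvInnerB, List.foldl_cons, ← pvInnerB]
    refine ih _ ?_
    split_ifs
    · exact PySem.Set.nodup_add _ _ h
    · exact h

theorem pvNodup_foldB (cs : List Char) (vpos l : List Nat) (s : PySem.Set String)
    (h : List.Nodup s) : List.Nodup (l.foldl (fun s p => pvInnerB cs vpos p s) s) := by
  induction l generalizing s with
  | nil => exact h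
  | cons p t ih => exact ih _ (pvNodup_innerB _ _ _ _ h)

theorem pvMem_seen (cs : List Char) (x : String) :
    x ∈ ((List.range cs.length).filter (fun k => cs.getD k ' ' ∈ pvVowelsA)).foldl
          (fun s p => pvInnerB cs ((List.range cs.length).filter (fun k => cs.getD k ' ' ∈ pvVowelsA)) p s)
          (PySem.Set.empty : PySem.Set String) ↔ pvGood cs x := by
  rw [pvMem_foldB]
  have hv : ∀ k : Nat, k ∈ (List.range cs.length).filter (fun k => cs.getD k ' ' ∈ pvVowelsA) ↔
      k < cs.length ∧ cs.getD k ' ' ∈ pvVowelsA := by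
    intro k
    simp [List.mem_filter, List.mem_range]
  constructor
  · rintro (hx | ⟨p, hp, q, hq, hle, rfl⟩)
    · simp [PySem.Set.empty] at hx
    · rw [hv] at hp hq
      exact ⟨p, q, hle, hq.1, hp.2, hq.2, rfl⟩
  · rintro ⟨p, q, hle, hq, hp, hqv, rfl⟩
    refine Or.inr ⟨p, (hv p).2 ⟨by omega, hp⟩, q, (hv q).2 ⟨hq, hqv⟩, hle, rfl⟩

-- ===== VERDICT (by name: the statement is the Claim_ definition above) =====
theorem get_vowel_substrings_spec : Claim_equal_get_vowel_substrings := by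
  intro txt _
  unfold Spec_get_vowel_substrings get_vowel_substrings get_vowel_substrings_alt
  set cs := txt.toList with hcs
  set l₁ := pvLoopA cs [] with hl₁
  set l₂ := ((List.range cs.length).filter (fun k => cs.getD k ' ' ∈ pvVowelsA)).foldl
      (fun s p => pvInnerB cs ((List.range cs.length).filter (fun k => cs.getD k ' ' ∈ pvVowelsA)) p s)
      (PySem.Set.empty : PySem.Set String) with hl₂
  have hn₁ : l₁.Nodup := pvNodup_loopA cs [] List.nodup_nil
  have hn₂ : l₂.Nodup := pvNodup_foldB cs _ _ _ List.nodup_nil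
  have hperm : l₁.Perm l₂ := by
    rw [List.perm_ext_iff_of_nodup hn₁ hn₂]
    intro x
    rw [hl₁, pvMem_loopA, hl₂, pvMem_seen]
    simp
  exact PySem.List.eq_of_perm_of_pairwise_le_of_injective (fun x => x) (fun _ _ h => h)
    ((PySem.List.sorted_perm l₁ _ _).trans (hperm.trans (PySem.List.sorted_perm l₂ _ _).symm))
    (PySem.List.sorted_pairwise _ _) (PySem.List.sorted_pairwise _ _)
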